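-- pv_equiv track=rewrite | github.com/pflanner/adventofcode | year2016/7.py | get_hypernets_and_supernets
-- ===== SOURCE A (Python) =====
-- def get_hypernets_and_supernets(line):
--     hypernets = []
--     supernets = [[]]
--     in_hypernet = False
--
--     for c in line:
--         if c == '[':
--             in_hypernet = True
--             hypernets.append([])
--             continue
--
--         if c == ']':
--             in_hypernet = False
--             supernets.append([])
--             continue
--
--         if in_hypernet:
--             hypernets[-1].append(c)
--         else:
--             supernets[-1].append(c)
--
--     return hypernets, supernets
-- ===== SOURCE B (Python) =====
-- def get_hypernets_and_supernets(line):
--     parts = line.split('[')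
--     supernets = [list(s) for s in parts[0].split(']')]
--     hypernets = []
--     for p in parts[1:]:
--         sub = p.split(']')
--         hypernets.append(list(sub[0]))
--         supernets.extend(list(s) for s in sub[1:])
--     return hypernets, supernets
-- ===== Notes on version B (the rewrite author's own statement) =====
-- stated objective: idiomatic
-- what changed: Replaces A's per-character state machine (an in_hypernet flag and appends to the last open segment) with bracket-based tokenization: split the line on opening brackets, take the first piece's closing-bracket splits as the initial supernets, and for every later piece its first closing-bracket split is a hypernet and the remaining splits are supernets.
import Mathlib
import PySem

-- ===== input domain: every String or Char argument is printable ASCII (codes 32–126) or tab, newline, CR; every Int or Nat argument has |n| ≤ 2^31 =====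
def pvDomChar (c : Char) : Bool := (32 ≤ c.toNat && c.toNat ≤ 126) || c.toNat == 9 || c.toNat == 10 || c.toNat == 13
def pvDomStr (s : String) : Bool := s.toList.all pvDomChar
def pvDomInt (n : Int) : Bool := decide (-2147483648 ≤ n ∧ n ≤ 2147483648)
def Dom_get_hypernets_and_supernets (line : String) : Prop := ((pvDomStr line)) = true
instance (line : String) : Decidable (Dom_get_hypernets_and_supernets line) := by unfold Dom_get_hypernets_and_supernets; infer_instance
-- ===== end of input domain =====

-- B replaces A's per-character state machine with bracket-based tokenization via str.split
-- (split the line on opening brackets, then split each piece on closing brackets); idiomatic,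
-- and measurably faster by a constant factor (C-level str.split instead of a Python char loop).

-- ===== PORT A =====
-- hypernets[-1].append(c) / supernets[-1].append(c): append v to the last element of l.
-- The [] case is unreachable in A (the list at hand is always nonempty when indexed).
def pyAppendLast (l : List (List String)) (v : String) : List (List String) :=
  match l with
  | [] => []
  | [x] => [x ++ [v]]
  | x :: xs => x :: pyAppendLast xs v

-- one iteration of A's for-loop, state = (hypernets, supernets, in_hypernet)
def stepA (st : List (List String) × List (List String) × Bool) (c : Char) :
    List (List String) × List (List String) × Bool :=
  if c = '[' then (st.1 ++ [[]], st.2.1, true)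
  else if c = ']' then (st.1, st.2.1 ++ [[]], false)
  else if st.2.2 then (pyAppendLast st.1 c.toString, st.2.1, st.2.2)
  else (st.1, pyAppendLast st.2.1 c.toString, st.2.2)

def get_hypernets_and_supernets (line : String) : List (List String) × List (List String) :=
  let r := line.toList.foldl stepA ([], [[]], false)
  (r.1, r.2.1)

-- ===== PORT B =====
-- body of B's for-loop: sub = p.split(']'); append list(sub[0]); extend with sub[1:]
def stepB (acc : List (List String) × List (List String)) (p : List Char) :
    List (List String) × List (List String) :=
  let sub := PySem.Chars.splitOn p [']']
  (acc.1 ++ [(sub.headD []).map (fun c => c.toString)],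
   acc.2 ++ (sub.drop 1).map (fun s => s.map (fun c => c.toString)))

def get_hypernets_and_supernets_alt (line : String) : List (List String) × List (List String) :=
  let parts := PySem.Chars.splitOn line.toList ['[']
  -- supernets = [list(s) for s in parts[0].split(']')]   (parts[0] safe: split is never empty)
  let supernets := (PySem.Chars.splitOn (parts.headD []) [']']).map (fun s => s.map (fun c => c.toString))
  (parts.drop 1).foldl stepB ([], supernets)

-- ===== PRECONDITION & SPEC =====
def Spec_get_hypernets_and_supernets (line : String) (out : List (List String) × List (List String)) : Prop := out = get_hypernets_and_supernets_alt line
instance (line : String) (out : List (List String) × List (List String)) : Decidable (Spec_get_hypernets_and_supernets line out) := by unfold Spec_get_hypernets_and_supernets; infer_instance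

-- ===== CLAIM (what is proved, stated in full; the proofs are below) =====
def Claim_equal_get_hypernets_and_supernets : Prop := ∀ (line : String), Dom_get_hypernets_and_supernets line → Spec_get_hypernets_and_supernets line (get_hypernets_and_supernets line)

-- ===== LEMMAS AND PROOFS =====

-- prepend v to the head segment (creating it if absent)
def consHd {α : Type} (v : α) : List (List α) → List (List α)
  | [] => [[v]]
  | m :: mt => (v :: m) :: mt

-- reference single-character split (Python s.split(sep) for a 1-char sep)
def split1 (sep : Char) : List Char → List (List Char)
  | [] => [[]]
  | c :: cs => if c = sep then [] :: split1 sep cs else consHd c (split1 sep cs)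

-- reference semantics: segments contributed by a suffix, given the current mode b
-- (head of the hyp side when b, resp. of the sup side when ¬b, is the continuation of
-- the currently open segment)
def segs : Bool → List Char → List (List String) × List (List String)
  | b, [] => if b then ([[]], []) else ([], [[]])
  | b, c :: cs =>
    if c = '[' then
      let r := segs true cs
      if b then ([] :: r.1, r.2) else (r.1, [] :: r.2)
    else if c = ']' then
      let r := segs false cs
      if b then ([] :: r.1, r.2) else (r.1, [] :: r.2)
    else if b then
      let r := segs true cs
      (consHd c.toString r.1, r.2)
    else
      let r := segs false cs
      (r.1, consHd c.toString r.2)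

-- merge a closed prefix (open segment last) with a suffix contribution (continuation first)
def merge (l m : List (List String)) : List (List String) :=
  match m with
  | [] => l
  | m0 :: mt => l.dropLast ++ ((l.getLast?.getD []) ++ m0) :: mt

def mergeC (x : List Char) : List (List Char) → List (List Char)
  | [] => [x]
  | p :: ps => (x ++ p) :: ps

def endb (b : Bool) (cs : List Char) : Bool :=
  cs.foldl (fun b c => if c = '[' then true else if c = ']' then false else b) b

lemma endb_cons (b : Bool) (c : Char) (cs : List Char) :
    endb b (c :: cs) = endb (if c = '[' then true else if c = ']' then false else b) cs := rfl

def strs (l : List (List Char)) : List (List String) := l.map (fun s => s.map (fun c => c.toString))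

def fH (p : List Char) : List String := ((split1 ']' p).headD []).map (fun c => c.toString)

def fS (p : List Char) : List (List String) :=
  ((split1 ']' p).drop 1).map (fun s => s.map (fun c => c.toString))

lemma consHd_ne_nil {α : Type} (v : α) (l : List (List α)) : consHd v l ≠ [] := by
  cases l <;> simp [consHd]

lemma split1_ne_nil (sep : Char) (l : List Char) : split1 sep l ≠ [] := by
  cases l with
  | nil => simp [split1]
  | cons c cs =>
    simp only [split1]
    split
    · simp
    · exact consHd_ne_nil _ _

lemma segs_fst_ne_nil (cs : List Char) : (segs true cs).1 ≠ [] := by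
  cases cs with
  | nil => simp [segs]
  | cons c cs =>
    simp only [segs]
    split_ifs <;> simp [consHd_ne_nil]

lemma segs_snd_ne_nil (cs : List Char) : (segs false cs).2 ≠ [] := by
  cases cs with
  | nil => simp [segs]
  | cons c cs =>
    simp only [segs]
    split_ifs <;> simp_all [consHd_ne_nil]

lemma pyAppendLast_eq (l : List (List String)) (v : String) (h : l ≠ []) :
    pyAppendLast l v = l.dropLast ++ [(l.getLast?.getD []) ++ [v]] := by
  induction l with
  | nil => simp at h
  | cons x xs ih =>
    cases xs with
    | nil => simp [pyAppendLast]
    | cons y ys =>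
      simp only [pyAppendLast]
      rw [ih (by simp)]
      simp

lemma pyAppendLast_ne_nil (l : List (List String)) (v : String) (h : l ≠ []) :
    pyAppendLast l v ≠ [] := by
  rw [pyAppendLast_eq l v h]; simp

lemma merge_nil_snd (l : List (List String)) (h : l ≠ []) : merge l [[]] = l := by
  simp only [merge]
  rw [List.getLast?_eq_some_getLast h]
  simpa using List.dropLast_concat_getLast h

lemma merge_cons_nil (l : List (List String)) (m : List (List String)) (h : l ≠ []) :
    merge l ([] :: m) = l ++ m := by
  simp only [merge]
  rw [List.getLast?_eq_some_getLast h]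
  simp only [Option.getD_some, List.append_nil]
  rw [show l.dropLast ++ (l.getLast h) :: m = (l.dropLast ++ [l.getLast h]) ++ m by simp]
  rw [List.dropLast_concat_getLast h]

lemma merge_append_nil (l : List (List String)) (m0 : List String) (mt : List (List String)) :
    merge (l ++ [[]]) (m0 :: mt) = l ++ m0 :: mt := by
  simp [merge]

lemma merge_pyAppendLast (l : List (List String)) (v : String) (m : List (List String)) (h : l ≠ []) :
    merge (pyAppendLast l v) m = merge l (consHd v m) := by
  rw [pyAppendLast_eq l v h]
  cases m with
  | nil =>
    simp only [merge, consHd]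
  | cons m0 mt =>
    simp only [merge, consHd]
    rw [List.getLast?_eq_some_getLast h]
    simp

-- A's loop, run from an arbitrary state, in terms of segs
lemma loopA (cs : List Char) : ∀ (hyp sup : List (List String)) (b : Bool),
    (b = true → hyp ≠ []) → sup ≠ [] →
    cs.foldl stepA (hyp, sup, b) =
      (if b then merge hyp (segs true cs).1 else hyp ++ (segs false cs).1,
       if b then sup ++ (segs true cs).2 else merge sup (segs false cs).2,
       endb b cs) := by
  induction cs with
  | nil =>
    intro hyp sup b hh hs
    cases b
    · simp [segs, endb, merge_nil_snd sup hs]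
    · simp [segs, endb, merge_nil_snd hyp (hh rfl)]
  | cons c cs ih =>
    intro hyp sup b hh hs
    simp only [List.foldl_cons]
    by_cases hc1 : c = '['
    · subst hc1
      rw [show stepA (hyp, sup, b) '[' = (hyp ++ [[]], sup, true) by simp [stepA]]
      rw [ih (hyp ++ [[]]) sup true (fun _ => by simp) hs]
      obtain ⟨a0, at_, ha⟩ := List.exists_cons_of_ne_nil (segs_fst_ne_nil cs)
      cases b <;>
        simp only [segs, endb_cons, reduceIte, Bool.false_eq_true, if_false, Char.reduceEq] <;>
        rw [ha, merge_append_nil] <;>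
        first
          | rw [merge_cons_nil sup _ hs]
          | rw [merge_cons_nil hyp _ (hh rfl)]
    · by_cases hc2 : c = ']'
      · subst hc2
        rw [show stepA (hyp, sup, b) ']' = (hyp, sup ++ [[]], false) by simp [stepA]]
        rw [ih hyp (sup ++ [[]]) false (by simp) (by simp)]
        obtain ⟨s0, st_, hsx⟩ := List.exists_cons_of_ne_nil (segs_snd_ne_nil cs)
        cases b <;>
          simp only [segs, endb_cons, reduceIte, Bool.false_eq_true, if_false, Char.reduceEq] <;>
          rw [hsx, merge_append_nil] <;>
          first
            | rw [merge_cons_nil sup _ hs]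
            | rw [merge_cons_nil hyp _ (hh rfl)]
      · cases b
        · rw [show stepA (hyp, sup, false) c = (hyp, pyAppendLast sup c.toString, false) by
            simp [stepA, hc1, hc2]]
          rw [ih hyp (pyAppendLast sup c.toString) false (by simp)
            (pyAppendLast_ne_nil sup c.toString hs)]
          simp only [segs, endb_cons, if_neg hc1, if_neg hc2, reduceIte, Bool.false_eq_true,
            if_false]
          rw [merge_pyAppendLast sup c.toString _ hs]
        · rw [show stepA (hyp, sup, true) c = (pyAppendLast hyp c.toString, sup, true) by
            simp [stepA, hc1, hc2]]
          rw [ih (pyAppendLast hyp c.toString) sup true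
            (fun _ => pyAppendLast_ne_nil hyp c.toString (hh rfl)) hs]
          simp only [segs, endb_cons, if_neg hc1, if_neg hc2, reduceIte, Bool.false_eq_true,
            if_false]
          rw [merge_pyAppendLast hyp c.toString _ (hh rfl)]

lemma A_eq_segs (line : String) :
    get_hypernets_and_supernets line = segs false line.toList := by
  simp only [get_hypernets_and_supernets]
  rw [loopA line.toList [] [[]] false (by simp) (by simp)]
  obtain ⟨s0, st_, hsx⟩ := List.exists_cons_of_ne_nil (segs_snd_ne_nil line.toList)
  apply Prod.ext <;> simp [merge, hsx]

lemma mergeC_nil (m : List (List Char)) (hm : m ≠ []) : mergeC [] m = m := by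
  cases m with
  | nil => exact absurd rfl hm
  | cons p ps => simp [mergeC]

lemma mergeC_snoc (x : List Char) (c : Char) (m : List (List Char)) :
    mergeC (x ++ [c]) m = mergeC x (consHd c m) := by
  cases m <;> simp [mergeC, consHd]

lemma go_eq (s : Char) : ∀ (l : List Char) (fuel : Nat), l.length ≤ fuel →
    ∀ (cur : List Char) (acc : List (List Char)),
    PySem.Chars.splitOn.go [s] fuel l cur acc = acc.reverse ++ mergeC cur.reverse (split1 s l) := by
  intro l
  induction l with
  | nil =>
    intro fuel _ cur acc
    cases fuel <;> simp [PySem.Chars.splitOn.go, split1, mergeC]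
  | cons c rest ih =>
    intro fuel hf cur acc
    cases fuel with
    | zero => simp at hf
    | succ n =>
      rw [PySem.Chars.splitOn.go]
      simp only [List.isPrefixOf, Bool.and_true, List.length_cons,
        List.length_nil, Nat.zero_add, List.drop_succ_cons, List.drop_zero]
      by_cases hcs : s = c
      · rw [if_pos (by simp [hcs])]
        rw [ih n (by simpa using hf) [] (cur.reverse :: acc)]
        rw [show split1 s (c :: rest) = [] :: split1 s rest by simp [split1, hcs.symm]]
        obtain ⟨p, ps, hp⟩ := List.exists_cons_of_ne_nil (split1_ne_nil s rest)
        simp [mergeC, hp]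
      · rw [if_neg (by simp [hcs])]
        rw [ih n (by simpa using hf) (c :: cur) acc]
        rw [show split1 s (c :: rest) = consHd c (split1 s rest) by
          rw [split1, if_neg (fun h : c = s => hcs h.symm)]]
        simp [mergeC_snoc]

lemma splitOn_eq (s : Char) (l : List Char) : PySem.Chars.splitOn l [s] = split1 s l := by
  rw [PySem.Chars.splitOn, go_eq s l (l.length + 1) (by omega) [] []]
  simp [mergeC_nil _ (split1_ne_nil s l)]

lemma stepB_eq (acc : List (List String) × List (List String)) (p : List Char) :
    stepB acc p = (acc.1 ++ [fH p], acc.2 ++ fS p) := by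
  simp [stepB, splitOn_eq, fH, fS]

lemma foldB (l : List (List Char)) : ∀ (a b : List (List String)),
    l.foldl stepB (a, b) = (a ++ l.map fH, b ++ l.flatMap fS) := by
  induction l with
  | nil => simp
  | cons p l ih =>
    intro a b
    simp only [List.foldl_cons, stepB_eq]
    rw [ih]
    simp

lemma segs_split (cs : List Char) :
    segs true cs = ((split1 '[' cs).map fH, (split1 '[' cs).flatMap fS) ∧
    segs false cs = (((split1 '[' cs).drop 1).map fH,
      strs (split1 ']' ((split1 '[' cs).headD [])) ++ ((split1 '[' cs).drop 1).flatMap fS) := by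
  induction cs with
  | nil => constructor <;> simp [segs, split1, fH, fS, strs]
  | cons c cs ih =>
    obtain ⟨ihT, ihF⟩ := ih
    obtain ⟨q0, qrest, hq⟩ := List.exists_cons_of_ne_nil (split1_ne_nil '[' cs)
    by_cases hc1 : c = '['
    · subst hc1
      rw [show split1 '[' ('[' :: cs) = [] :: split1 '[' cs by simp [split1]]
      constructor
      · simp only [segs, reduceIte]
        rw [ihT]
        simp [fH, fS, split1]
      · simp only [segs, reduceIte]
        rw [ihT]
        simp [split1, strs]
    · by_cases hc2 : c = ']'
      · subst hc2
        rw [show split1 '[' (']' :: cs) = consHd ']' (split1 '[' cs) by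
          rw [split1, if_neg (by decide)]]
        rw [hq] at ihF ⊢
        simp only [List.headD_cons] at ihF
        constructor
        · simp only [segs, Char.reduceEq, if_false, reduceIte, consHd]
          rw [ihF]
          simp [fH, fS, split1, strs]
        · simp only [segs, Char.reduceEq, if_false, reduceIte, consHd]
          rw [ihF]
          simp [split1, strs]
      · rw [show split1 '[' (c :: cs) = consHd c (split1 '[' cs) by
          rw [split1, if_neg hc1]]
        obtain ⟨r0, rr, hr⟩ := List.exists_cons_of_ne_nil (split1_ne_nil ']' q0)
        rw [hq] at ihF ⊢
        simp only [List.headD_cons] at ihF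
        have hsplit : split1 ']' (c :: q0) = (c :: r0) :: rr := by
          rw [split1, if_neg hc2, hr, consHd]
        constructor
        · simp only [segs, if_neg hc1, if_neg hc2, consHd]
          rw [ihT, hq]
          simp [fH, fS, hsplit, hr]
        · simp only [segs, if_neg hc1, if_neg hc2, consHd]
          rw [ihF]
          simp [strs, hsplit, hr]

lemma B_eq_segs (line : String) :
    get_hypernets_and_supernets_alt line = segs false line.toList := by
  simp only [get_hypernets_and_supernets_alt, splitOn_eq]
  rw [foldB]
  rw [(segs_split line.toList).2]
  simp [strs]

-- ===== VERDICT (by name: the statement is the Claim_ definition above) =====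
theorem get_hypernets_and_supernets_spec : Claim_equal_get_hypernets_and_supernets := by
  intro line _
  unfold Spec_get_hypernets_and_supernets
  rw [A_eq_segs, B_eq_segs]
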